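-- pv_equiv track=rewrite | github.com/koreatech-algorithm-study/algorithm | baekjoon/1744/1744_김상현.py | solution
-- ===== SOURCE A (Python) =====
-- def solution(N, numbers):
--     answer = 0
--     positive, negative = [], []
--     for number in numbers:
--         if number > 0:
--             positive.append(number)
--         else:
--             negative.append(number)
--
--     positive.sort()
--     negative.sort(reverse=True)
--
--     while len(positive) > 1:
--         n1, n2 = positive.pop(), positive.pop()
--         answer += max(n1 * n2, n1 + n2)
--     if positive:
--         answer += positive[0]
--
--     while len(negative) > 1:
--         answer += negative.pop() * negative.pop()
--     if negative:
--         answer += negative[0]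
--
--     return answer
-- ===== SOURCE B (Python) =====
-- def _prod_pairs(xs):
--     # ascending non-positives: multiply consecutive pairs left-to-right; lone leftover added
--     t = 0
--     i = 0
--     while i + 1 < len(xs):
--         t += xs[i] * xs[i + 1]
--         i += 2
--     if i < len(xs):
--         t += xs[i]
--     return t
--
--
-- def _gain_pairs(xs):
--     # descending positives: pair from the front with max(product, sum); lone leftover added
--     t = 0
--     i = 0
--     while i + 1 < len(xs):
--         t += max(xs[i] * xs[i + 1], xs[i] + xs[i + 1])
--         i += 2
--     if i < len(xs):
--         t += xs[i]
--     return t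
--
--
-- def solution(N, numbers):
--     arr = sorted(numbers)
--     p = len([x for x in arr if x <= 0])
--     return _prod_pairs(arr[:p]) + _gain_pairs(arr[p:][::-1])
-- ===== Notes on version B (the rewrite author's own statement) =====
-- stated objective: alternative
-- what changed: B sorts the whole list once and splits it at the sign boundary, consuming the non-positive prefix and reversed positive suffix in pairs with two recursive helpers, instead of A's partition into two lists, two sorts and destructive pop()-driven while loops.
import Mathlib
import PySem

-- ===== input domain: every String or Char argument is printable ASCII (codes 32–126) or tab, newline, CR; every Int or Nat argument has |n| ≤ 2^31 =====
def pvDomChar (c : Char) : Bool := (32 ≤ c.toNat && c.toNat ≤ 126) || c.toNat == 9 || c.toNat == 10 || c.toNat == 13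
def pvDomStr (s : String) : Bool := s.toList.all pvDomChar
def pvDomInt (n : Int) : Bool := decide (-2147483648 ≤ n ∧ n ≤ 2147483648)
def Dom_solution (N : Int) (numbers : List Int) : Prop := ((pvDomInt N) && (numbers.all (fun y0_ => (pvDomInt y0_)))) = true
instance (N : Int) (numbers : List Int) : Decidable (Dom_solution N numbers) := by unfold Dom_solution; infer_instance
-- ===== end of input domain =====

-- B: one sort of the whole list + split at the sign boundary + two pair-consuming helpers,
-- instead of A's partition, two sorts and destructive pop loops (objective: alternative decomposition).

-- ===== PORT A =====
-- 'while len(positive) > 1: n1, n2 = positive.pop(), positive.pop(); answer += max(n1*n2, n1+n2)'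
-- followed by 'if positive: answer += positive[0]' ('positive[0]' on a list known nonempty = head).
def solutionPosLoop (positive : List Int) (answer : Int) : Int :=
  if positive.length > 1 then
    match h1 : PySem.List.pop? positive with
    | none => answer  -- unreachable: the list is nonempty
    | some (n1, p1) =>
      match h2 : PySem.List.pop? p1 with
      | none => answer  -- unreachable
      | some (n2, p2) => solutionPosLoop p2 (answer + max (n1 * n2) (n1 + n2))
  else
    match positive with
    | [] => answer
    | x :: _ => answer + x
termination_by positive.length
decreasing_by
  have e1 := PySem.List.length_of_pop?_eq_some _ h1
  have e2 := PySem.List.length_of_pop?_eq_some _ h2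
  simp at e1 e2; omega

-- 'while len(negative) > 1: answer += negative.pop() * negative.pop()' then 'if negative: answer += negative[0]'.
def solutionNegLoop (negative : List Int) (answer : Int) : Int :=
  if negative.length > 1 then
    match h1 : PySem.List.pop? negative with
    | none => answer  -- unreachable
    | some (n1, p1) =>
      match h2 : PySem.List.pop? p1 with
      | none => answer  -- unreachable
      | some (n2, p2) => solutionNegLoop p2 (answer + n1 * n2)
  else
    match negative with
    | [] => answer
    | x :: _ => answer + x
termination_by negative.length
decreasing_by
  have e1 := PySem.List.length_of_pop?_eq_some _ h1
  have e2 := PySem.List.length_of_pop?_eq_some _ h2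
  simp at e1 e2; omega

def solution (N : Int) (numbers : List Int) : Int :=
  let answer : Int := 0
  -- 'for number in numbers: positive.append(number) if number > 0 else negative.append(number)'
  let pn := numbers.foldl
    (fun (pn : List Int × List Int) number =>
      if number > 0 then (pn.1 ++ [number], pn.2) else (pn.1, pn.2 ++ [number]))
    (([], []) : List Int × List Int)
  let positive := PySem.List.sorted pn.1 (fun x => x) false
  let negative := PySem.List.sorted pn.2 (fun x => x) true
  let answer := solutionPosLoop positive answer
  let answer := solutionNegLoop negative answer
  answer

-- ===== PORT B =====
-- '_prod_pairs': 'while i + 1 < len(xs): t += xs[i]*xs[i+1]; i += 2' then 'if i < len(xs): t += xs[i]'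
-- (xs[i] with 0 ≤ i < len is PySem.List.pyGetD, exact here)
def prodPairsIdx (xs : List Int) (i t : Int) : Int :=
  if i + 1 < PySem.List.len xs then
    prodPairsIdx xs (i + 2) (t + PySem.List.pyGetD xs i 0 * PySem.List.pyGetD xs (i + 1) 0)
  else if i < PySem.List.len xs then t + PySem.List.pyGetD xs i 0
  else t
termination_by (PySem.List.len xs - i).toNat
decreasing_by simp only [PySem.List.len_eq] at *; omega

-- '_gain_pairs': same walk with 'max(xs[i]*xs[i+1], xs[i]+xs[i+1])'
def gainPairsIdx (xs : List Int) (i t : Int) : Int :=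
  if i + 1 < PySem.List.len xs then
    gainPairsIdx xs (i + 2)
      (t + max (PySem.List.pyGetD xs i 0 * PySem.List.pyGetD xs (i + 1) 0)
               (PySem.List.pyGetD xs i 0 + PySem.List.pyGetD xs (i + 1) 0))
  else if i < PySem.List.len xs then t + PySem.List.pyGetD xs i 0
  else t
termination_by (PySem.List.len xs - i).toNat
decreasing_by simp only [PySem.List.len_eq] at *; omega

def solution_alt (N : Int) (numbers : List Int) : Int :=
  let arr := PySem.List.sorted numbers (fun x => x) false
  let p := (arr.filter (fun x => decide (x ≤ 0))).length
  -- arr[:p] = take p, arr[p:] = drop p (exact: 0 ≤ p ≤ len arr), [::-1] = reverse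
  prodPairsIdx (arr.take p) 0 0 + gainPairsIdx ((arr.drop p).reverse) 0 0

-- ===== PRECONDITION & SPEC =====
def Spec_solution (N : Int) (numbers : List Int) (out : Int) : Prop := out = solution_alt N numbers
instance (N : Int) (numbers : List Int) (out : Int) : Decidable (Spec_solution N numbers out) := by unfold Spec_solution; infer_instance

-- ===== CLAIM (what is proved, stated in full; the proofs are below) =====
def Claim_equal_solution : Prop := ∀ (N : Int) (numbers : List Int), Dom_solution N numbers → Spec_solution N numbers (solution N numbers)

-- ===== LEMMAS AND PROOFS =====

-- proof-only helpers: the pair walks as structural recursion on the list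
def prodPairs : List Int → Int
  | x :: y :: rest => x * y + prodPairs rest
  | [x] => x
  | [] => 0

def gainPairs : List Int → Int
  | x :: y :: rest => max (x * y) (x + y) + gainPairs rest
  | [x] => x
  | [] => 0

theorem drop_pair (xs : List Int) (n : Nat) (h : n + 1 < xs.length) :
    xs.drop n = xs[n] :: xs[n + 1] :: xs.drop (n + 2) := by
  rw [List.drop_eq_getElem_cons (by omega), List.drop_eq_getElem_cons (by omega)]

theorem prodPairsIdx_eq (xs : List Int) (i t : Int) (hi : 0 ≤ i) :
    prodPairsIdx xs i t = t + prodPairs (xs.drop i.toNat) := by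
  revert hi
  induction i, t using prodPairsIdx.induct xs with
  | case1 i t h ih =>
    intro hi
    rw [prodPairsIdx]
    rw [if_pos h]
    simp only [PySem.List.len_eq] at h
    have h2 : (i + 2).toNat = i.toNat + 2 := by omega
    have hn : i.toNat + 1 < xs.length := by omega
    rw [ih (by omega), h2, drop_pair xs i.toNat hn, prodPairs,
        PySem.List.pyGetD_eq_getElem xs 0 hi (by omega),
        PySem.List.pyGetD_eq_getElem xs 0 (by omega) (by push_cast; omega)]
    have : (i + 1).toNat = i.toNat + 1 := by omega
    simp only [this]; ring
  | case2 i t h h2 =>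
    intro hi
    rw [prodPairsIdx, if_neg h, if_pos h2]
    simp only [PySem.List.len_eq] at h h2
    have hlt : i.toNat < xs.length := by omega
    have : xs.drop i.toNat = [xs[i.toNat]] := by
      rw [List.drop_eq_getElem_cons hlt, List.drop_eq_nil_of_le (by omega)]
    rw [this, prodPairs, PySem.List.pyGetD_eq_getElem xs 0 hi (by omega)]
  | case3 i t h h2 =>
    intro hi
    rw [prodPairsIdx, if_neg h, if_neg h2]
    simp only [PySem.List.len_eq] at h h2
    rw [List.drop_eq_nil_of_le (by omega), prodPairs]
    ring

theorem gainPairsIdx_eq (xs : List Int) (i t : Int) (hi : 0 ≤ i) :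
    gainPairsIdx xs i t = t + gainPairs (xs.drop i.toNat) := by
  revert hi
  induction i, t using gainPairsIdx.induct xs with
  | case1 i t h ih =>
    intro hi
    rw [gainPairsIdx]
    rw [if_pos h]
    simp only [PySem.List.len_eq] at h
    have h2 : (i + 2).toNat = i.toNat + 2 := by omega
    have hn : i.toNat + 1 < xs.length := by omega
    rw [ih (by omega), h2, drop_pair xs i.toNat hn, gainPairs,
        PySem.List.pyGetD_eq_getElem xs 0 hi (by omega),
        PySem.List.pyGetD_eq_getElem xs 0 (by omega) (by push_cast; omega)]
    have : (i + 1).toNat = i.toNat + 1 := by omega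
    simp only [this]; ring
  | case2 i t h h2 =>
    intro hi
    rw [gainPairsIdx, if_neg h, if_pos h2]
    simp only [PySem.List.len_eq] at h h2
    have hlt : i.toNat < xs.length := by omega
    have : xs.drop i.toNat = [xs[i.toNat]] := by
      rw [List.drop_eq_getElem_cons hlt, List.drop_eq_nil_of_le (by omega)]
    rw [this, gainPairs, PySem.List.pyGetD_eq_getElem xs 0 hi (by omega)]
  | case3 i t h h2 =>
    intro hi
    rw [gainPairsIdx, if_neg h, if_neg h2]
    simp only [PySem.List.len_eq] at h h2
    rw [List.drop_eq_nil_of_le (by omega), gainPairs]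
    ring

-- A's partition loop appending to both accumulators is the pair of filters.
theorem partition_foldl (numbers p₀ n₀ : List Int) :
    numbers.foldl
      (fun (pn : List Int × List Int) number =>
        if number > 0 then (pn.1 ++ [number], pn.2) else (pn.1, pn.2 ++ [number]))
      (p₀, n₀)
    = (p₀ ++ numbers.filter (fun x => decide (x > 0)),
       n₀ ++ numbers.filter (fun x => decide (x ≤ 0))) := by
  induction numbers generalizing p₀ n₀ with
  | nil => simp
  | cons x xs ih =>
    by_cases hx : x > 0
    · simp [hx, ih]
    · simp [hx, (by omega : x ≤ 0), ih]

-- popping from the end of r.reverse twice per round computes gainPairs r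
theorem posLoop_reverse (r : List Int) (acc : Int) :
    solutionPosLoop r.reverse acc = acc + gainPairs r := by
  induction r using gainPairs.induct generalizing acc with
  | case1 x y rest ih =>
    rw [solutionPosLoop.eq_def]
    have hr : (x :: y :: rest).reverse = (rest.reverse ++ [y]) ++ [x] := by simp
    rw [hr]
    have hlen : ((rest.reverse ++ [y]) ++ [x]).length > 1 := by simp
    have hpop : PySem.List.pop? (rest.reverse ++ [y] ++ [x]) = some (x, rest.reverse ++ [y]) :=
      PySem.List.pop?_last (rest.reverse ++ [y]) x
    rw [if_pos hlen]
    split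
    next heq => rw [hpop] at heq; simp at heq
    next n1 p1 heq =>
      rw [hpop] at heq
      injection heq with h; cases h
      split
      next heq2 => rw [PySem.List.pop?_last] at heq2; simp at heq2
      next n2 p2 heq2 =>
        rw [PySem.List.pop?_last] at heq2
        injection heq2 with h2; cases h2
        rw [ih, gainPairs]; ring
  | case2 x =>
    rw [solutionPosLoop.eq_def]; simp [gainPairs]
  | case3 =>
    rw [solutionPosLoop.eq_def]; simp [gainPairs]

theorem negLoop_reverse (a : List Int) (acc : Int) :
    solutionNegLoop a.reverse acc = acc + prodPairs a := by
  induction a using prodPairs.induct generalizing acc with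
  | case1 x y rest ih =>
    rw [solutionNegLoop.eq_def]
    have hr : (x :: y :: rest).reverse = (rest.reverse ++ [y]) ++ [x] := by simp
    rw [hr]
    have hlen : ((rest.reverse ++ [y]) ++ [x]).length > 1 := by simp
    have hpop : PySem.List.pop? (rest.reverse ++ [y] ++ [x]) = some (x, rest.reverse ++ [y]) :=
      PySem.List.pop?_last (rest.reverse ++ [y]) x
    rw [if_pos hlen]
    split
    next heq => rw [hpop] at heq; simp at heq
    next n1 p1 heq =>
      rw [hpop] at heq
      injection heq with h; cases h
      split
      next heq2 => rw [PySem.List.pop?_last] at heq2; simp at heq2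
      next n2 p2 heq2 =>
        rw [PySem.List.pop?_last] at heq2
        injection heq2 with h2; cases h2
        rw [ih, prodPairs]; ring
  | case2 x =>
    rw [solutionNegLoop.eq_def]; simp [prodPairs]
  | case3 =>
    rw [solutionNegLoop.eq_def]; simp [prodPairs]

-- sorted(xs, reverse=True) for Int values is the reverse of sorted(xs)
theorem sorted_rev_eq_reverse (l : List Int) :
    PySem.List.sorted l (fun x => x) true = (PySem.List.sorted l (fun x => x) false).reverse := by
  apply PySem.List.eq_of_perm_of_pairwise_le_of_injective (key := fun x : Int => -x) neg_injective
  · exact (PySem.List.sorted_perm l _ true).trans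
      (((List.reverse_perm _).trans (PySem.List.sorted_perm l _ false)).symm)
  · have := PySem.List.sorted_pairwise_rev l (fun x : Int => x)
    exact this.imp (by intro a b h; simpa using h)
  · rw [List.pairwise_reverse]
    have := PySem.List.sorted_pairwise l (fun x : Int => x)
    exact this.imp (by intro a b h; simpa using h)

-- one ascending sort of the whole list is the ascending sort of the non-positives followed
-- by the ascending sort of the positives
theorem sorted_split (numbers : List Int) :
    PySem.List.sorted numbers (fun x => x) false
      = PySem.List.sorted (numbers.filter fun x => decide (x ≤ 0)) (fun x => x) false
        ++ PySem.List.sorted (numbers.filter fun x => decide (x > 0)) (fun x => x) false := by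
  apply PySem.List.eq_of_perm_of_pairwise_le_of_injective (key := fun x : Int => x)
    (fun a b h => h)
  · have hpred : numbers.filter (fun x : Int => !decide (x ≤ 0)) = numbers.filter (fun x => decide (x > 0)) := by
      apply List.filter_congr; intro x _; by_cases h : x ≤ 0 <;> simp [h] <;> omega
    have h1 : ((PySem.List.sorted (numbers.filter fun x => decide (x ≤ 0)) (fun x => x) false)
        ++ PySem.List.sorted (numbers.filter fun x => decide (x > 0)) (fun x => x) false).Perm
        (numbers.filter (fun x => decide (x ≤ 0)) ++ numbers.filter (fun x => decide (x > 0))) :=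
      List.Perm.append (PySem.List.sorted_perm _ _ _) (PySem.List.sorted_perm _ _ _)
    have h2 : (numbers.filter (fun x => decide (x ≤ 0)) ++ numbers.filter (fun x => decide (x > 0))).Perm numbers := by
      rw [← hpred]; exact List.filter_append_perm _ _
    exact (PySem.List.sorted_perm _ _ _).trans ((h1.trans h2).symm)
  · exact PySem.List.sorted_pairwise _ _
  · rw [List.pairwise_append]
    refine ⟨PySem.List.sorted_pairwise _ _, PySem.List.sorted_pairwise _ _, ?_⟩
    intro a ha b hb
    rw [PySem.List.mem_sorted, List.mem_filter] at ha hb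
    have h1 : a ≤ 0 := by simpa using ha.2
    have h2 : b > 0 := by simpa using hb.2
    omega

theorem solution_eq (N : Int) (numbers : List Int) :
    solution N numbers = solution_alt N numbers := by
  unfold solution solution_alt
  rw [partition_foldl]
  simp only [List.nil_append]
  set sn := PySem.List.sorted (numbers.filter fun x => decide (x ≤ 0)) (fun x => x) false with hsn
  set sp := PySem.List.sorted (numbers.filter fun x => decide (x > 0)) (fun x => x) false with hsp
  have hsplit := sorted_split numbers
  rw [hsplit, sorted_rev_eq_reverse]
  -- the filter of the concatenation is exactly sn
  have hfn : ∀ x ∈ sn, decide (x ≤ 0) = true := by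
    intro x hx
    rw [hsn, PySem.List.mem_sorted, List.mem_filter] at hx
    exact hx.2
  have hfp : ∀ x ∈ sp, ¬ decide (x ≤ 0) = true := by
    intro x hx
    rw [hsp, PySem.List.mem_sorted, List.mem_filter] at hx
    have : x > 0 := by simpa using hx.2
    simp; omega
  have hfilter : (sn ++ sp).filter (fun x => decide (x ≤ 0)) = sn := by
    rw [List.filter_append, List.filter_eq_self.mpr hfn,
        List.filter_eq_nil_iff.mpr hfp, List.append_nil]
  rw [hfilter, List.take_left' rfl, List.drop_left' rfl]
  have hpos : solutionPosLoop sp 0 = gainPairs sp.reverse := by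
    have := posLoop_reverse sp.reverse 0
    simpa using this
  rw [hpos, ← hsn, negLoop_reverse,
      prodPairsIdx_eq _ 0 0 (le_refl 0), gainPairsIdx_eq _ 0 0 (le_refl 0)]
  simp only [Int.toNat_zero, List.drop_zero]
  ring

-- ===== VERDICT (by name: the statement is the Claim_ definition above) =====
theorem solution_spec : Claim_equal_solution := by
  intro N numbers _
  unfold Spec_solution
  exact solution_eq N numbers
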